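-- pv_equiv track=rewrite | github.com/gusye1234/BaiduGame | post_process.py | return_diff
-- ===== SOURCE A (Python) =====
-- def return_diff(left, right):
--     current_in = False
--     l_curr, r_curr = [], []
--     re = []
--     for i in range(len(left)):
--         if left[i] == right[i]:
--             current_in = False
--             if len(l_curr):
--                 re.append(("".join(l_curr), "".join(r_curr)))
--                 l_curr = []
--                 r_curr = []
--         else:
--             current_in = True
--             l_curr.append(left[i])
--             r_curr.append(right[i])
--     if len(l_curr):
--         re.append(("".join(l_curr), "".join(r_curr)))
--     return re
-- ===== SOURCE B (Python) =====
-- def return_diff(left, right):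
--     res = []
--     i, n = 0, len(left)
--     while i < n:
--         if left[i] == right[i]:
--             i += 1
--         else:
--             j = i + 1
--             while j < n and left[j] != right[j]:
--                 j += 1
--             res.append(("".join(left[i:j]), "".join(right[i:j])))
--             i = j
--     return res
-- ===== Notes on version B (the rewrite author's own statement) =====
-- stated objective: simpler
-- what changed: Replaces the buffer lists, the current_in flag and the flush-after-loop with a two-index run scanner: an inner while finds the end of each differing run and the pair is built once by slicing.
import Mathlib
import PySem

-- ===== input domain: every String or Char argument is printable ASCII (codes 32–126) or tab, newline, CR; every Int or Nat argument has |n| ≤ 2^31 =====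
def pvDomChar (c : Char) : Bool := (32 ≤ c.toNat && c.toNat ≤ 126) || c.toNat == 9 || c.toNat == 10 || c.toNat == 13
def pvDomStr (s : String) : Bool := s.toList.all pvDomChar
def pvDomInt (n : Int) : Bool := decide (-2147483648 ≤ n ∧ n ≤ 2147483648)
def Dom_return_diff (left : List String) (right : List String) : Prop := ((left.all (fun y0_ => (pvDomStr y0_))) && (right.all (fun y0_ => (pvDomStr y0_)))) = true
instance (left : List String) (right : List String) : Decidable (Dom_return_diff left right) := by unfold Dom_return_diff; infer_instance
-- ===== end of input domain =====

-- B replaces A's buffer lists / flag / final flush with a two-index run scanner; same cost, plainer code.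

-- ===== PORT A =====
-- list indexing is written List.getD i "": exact for i < length; Pre_ excludes the IndexError case (right shorter than left)
def aStep (left right : List String) (st : Bool × List String × List String × List (String × String))
    (i : Nat) : Bool × List String × List String × List (String × String) :=
  let (_, l_curr, r_curr, re) := st
  if left.getD i "" = right.getD i "" then
    if l_curr.length ≠ 0 then
      (false, [], [], re ++ [(String.join l_curr, String.join r_curr)])
    else
      (false, l_curr, r_curr, re)
  else
    (true, l_curr ++ [left.getD i ""], r_curr ++ [right.getD i ""], re)

def return_diff (left : List String) (right : List String) : List (String × String) :=
  let st := (List.range left.length).foldl (aStep left right) (false, [], [], [])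
  if st.2.1.length ≠ 0 then st.2.2.2 ++ [(String.join st.2.1, String.join st.2.2.1)]
  else st.2.2.2

-- ===== PORT B =====
-- inner while: advance j while j < n and left[j] != right[j]
def bRunEnd (left right : List String) (n j : Nat) : Nat :=
  if j < n then
    if left.getD j "" = right.getD j "" then j else bRunEnd left right n (j + 1)
  else j
termination_by n - j

-- needed by bLoop's termination: the inner while never moves j backwards
theorem bRunEnd_ge (left right : List String) (n j : Nat) : j ≤ bRunEnd left right n j := by
  unfold bRunEnd
  split
  · split
    · exact Nat.le_refl _
    · have := bRunEnd_ge left right n (j + 1)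
      omega
  · exact Nat.le_refl _
termination_by n - j

-- outer while over i; left[i:j] is (drop i).take (j-i), exact for 0 ≤ i ≤ j
def bLoop (left right : List String) (n i : Nat) : List (String × String) :=
  if _h : i < n then
    if left.getD i "" = right.getD i "" then bLoop left right n (i + 1)
    else
      let j := bRunEnd left right n (i + 1)
      have _hj : i + 1 ≤ j := bRunEnd_ge left right n (i + 1)
      (String.join ((left.drop i).take (j - i)), String.join ((right.drop i).take (j - i)))
        :: bLoop left right n j
  else []
termination_by n - i
decreasing_by all_goals omega

def return_diff_alt (left : List String) (right : List String) : List (String × String) :=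
  bLoop left right left.length 0

-- ===== PRECONDITION & SPEC =====
-- Pre_: A indexes right[i] for every i < len(left), so it raises IndexError when right is shorter than left.
def Pre_return_diff (left : List String) (right : List String) : Prop :=
  left.length ≤ right.length
instance (left : List String) (right : List String) : Decidable (Pre_return_diff left right) := by
  unfold Pre_return_diff; infer_instance
def pvWitness_return_diff : List String × List String := (["a", "b", "c"], ["a", "x", "c"])

def Spec_return_diff (left : List String) (right : List String) (out : List (String × String)) : Prop := out = return_diff_alt left right
instance (left : List String) (right : List String) (out : List (String × String)) : Decidable (Spec_return_diff left right out) := by unfold Spec_return_diff; infer_instance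

-- ===== CLAIM (what is proved, stated in full; the proofs are below) =====
def Claim_equal_return_diff : Prop := ∀ (left : List String) (right : List String), Dom_return_diff left right → Pre_return_diff left right → Spec_return_diff left right (return_diff left right)

-- ===== LEMMAS AND PROOFS =====
-- A's loop rewritten as a recursion over the index, buffers and output as parameters
def aLoop (left right : List String) (n i : Nat) (l r : List String)
    (re : List (String × String)) : List (String × String) :=
  if i < n then
    if left.getD i "" = right.getD i "" then
      if l.length ≠ 0 then
        aLoop left right n (i + 1) [] [] (re ++ [(String.join l, String.join r)])
      else aLoop left right n (i + 1) l r re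
    else aLoop left right n (i + 1) (l ++ [left.getD i ""]) (r ++ [right.getD i ""]) re
  else if l.length ≠ 0 then re ++ [(String.join l, String.join r)] else re
termination_by n - i

theorem fold_eq (left right : List String) : ∀ (k i : Nat) (b : Bool) (l r : List String)
    (re : List (String × String)), i + k = left.length →
    (let st := (List.range' i k).foldl (aStep left right) (b, l, r, re)
     if st.2.1.length ≠ 0 then st.2.2.2 ++ [(String.join st.2.1, String.join st.2.2.1)]
     else st.2.2.2)
    = aLoop left right left.length i l r re := by
  intro k
  induction k with
  | zero =>
    intro i b l r re h
    rw [aLoop, if_neg (by omega : ¬ i < left.length)]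
    rfl
  | succ k ih =>
    intro i b l r re h
    have hi : i < left.length := by omega
    rw [List.range'_succ]
    simp only [List.foldl_cons, aStep]
    by_cases heq : left.getD i "" = right.getD i ""
    · rw [if_pos heq, aLoop, if_pos hi, if_pos heq]
      by_cases hl : l.length ≠ 0
      · rw [if_pos hl, if_pos hl]
        exact ih (i + 1) false [] [] _ (by omega)
      · rw [if_neg hl, if_neg hl]
        exact ih (i + 1) false l r re (by omega)
    · rw [if_neg heq, aLoop, if_pos hi, if_neg heq]
      exact ih (i + 1) true _ _ re (by omega)

theorem key (left right : List String) (hpre : left.length ≤ right.length)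
    (i : Nat) (re : List (String × String)) :
    (aLoop left right left.length i [] [] re = re ++ bLoop left right left.length i) ∧
    (∀ l r : List String, l ≠ [] →
      aLoop left right left.length i l r re =
        re ++ (String.join (l ++ (left.drop i).take (bRunEnd left right left.length i - i)),
               String.join (r ++ (right.drop i).take (bRunEnd left right left.length i - i)))
          :: bLoop left right left.length (bRunEnd left right left.length i)) := by
  by_cases hi : i < left.length
  · by_cases heq : left.getD i "" = right.getD i ""
    · have hre : bRunEnd left right left.length i = i := by
        rw [bRunEnd, if_pos hi, if_pos heq]
      have hbl : bLoop left right left.length i = bLoop left right left.length (i + 1) := by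
        rw [bLoop, dif_pos hi, if_pos heq]
      constructor
      · rw [aLoop, if_pos hi, if_pos heq,
          if_neg (by simp : ¬ ([] : List String).length ≠ 0)]
        rw [(key left right hpre (i + 1) re).1, hbl]
      · intro l r hl
        have hl' : l.length ≠ 0 := by simpa using hl
        rw [aLoop, if_pos hi, if_pos heq, if_pos hl']
        rw [(key left right hpre (i + 1) (re ++ [(String.join l, String.join r)])).1]
        rw [hre, hbl]
        simp
    · have hir : i < right.length := by omega
      have hre : bRunEnd left right left.length i = bRunEnd left right left.length (i + 1) := by
        rw [bRunEnd, if_pos hi, if_neg heq]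
      have hj : i + 1 ≤ bRunEnd left right left.length (i + 1) := bRunEnd_ge _ _ _ _
      have hsl : ∀ (xs : List String), i < xs.length →
          xs.getD i "" :: (xs.drop (i + 1)).take (bRunEnd left right left.length (i + 1) - (i + 1))
            = (xs.drop i).take (bRunEnd left right left.length (i + 1) - i) := by
        intro xs hx
        rw [List.getD_eq_getElem xs "" hx, List.drop_eq_getElem_cons hx]
        have h2 : bRunEnd left right left.length (i + 1) - i
            = (bRunEnd left right left.length (i + 1) - (i + 1)) + 1 := by omega
        rw [h2, List.take_succ_cons]
      have hblo : bLoop left right left.length i =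
          (String.join ((left.drop i).take (bRunEnd left right left.length (i + 1) - i)),
           String.join ((right.drop i).take (bRunEnd left right left.length (i + 1) - i)))
            :: bLoop left right left.length (bRunEnd left right left.length (i + 1)) := by
        rw [bLoop, dif_pos hi, if_neg heq]
      constructor
      · rw [aLoop, if_pos hi, if_neg heq]
        rw [(key left right hpre (i + 1) re).2 ([] ++ [left.getD i ""]) ([] ++ [right.getD i ""])
          (by simp)]
        rw [hblo]
        simp only [List.nil_append, List.cons_append, hsl left hi, hsl right hir]
      · intro l r hl
        rw [aLoop, if_pos hi, if_neg heq]
        rw [(key left right hpre (i + 1) re).2 (l ++ [left.getD i ""]) (r ++ [right.getD i ""])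
          (by simp)]
        rw [hre]
        rw [← hsl left hi, ← hsl right hir]
        simp
  · have hre : bRunEnd left right left.length i = i := by
      rw [bRunEnd, if_neg hi]
    have hbl : bLoop left right left.length i = [] := by
      rw [bLoop, dif_neg hi]
    constructor
    · rw [aLoop, if_neg hi, if_neg (by simp : ¬ ([] : List String).length ≠ 0), hbl]
      simp
    · intro l r hl
      have hl' : l.length ≠ 0 := by simpa using hl
      rw [aLoop, if_neg hi, if_pos hl', hre, hbl]
      simp
termination_by left.length - i
decreasing_by all_goals omega

-- ===== VERDICT =====
theorem return_diff_spec : Claim_equal_return_diff := by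
  intro left right _hdom hpre
  unfold Spec_return_diff return_diff_alt
  calc return_diff left right
      = aLoop left right left.length 0 [] [] [] := by
        rw [return_diff, List.range_eq_range']
        exact fold_eq left right left.length 0 false [] [] [] (by omega)
    _ = [] ++ bLoop left right left.length 0 := (key left right hpre 0 []).1
    _ = bLoop left right left.length 0 := by simp
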